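-- pv_equiv track=rewrite | github.com/jmparis/advent-of-code | 2025/Day 10 - Factory/debug_machine8.py | parse_machine_line
-- ===== SOURCE A (Python) =====
-- def parse_machine_line(line):
--     start_brace = line.find('{')
--     end_brace = line.find('}')
--     joltage_str = line[start_brace + 1:end_brace]
--
--     if joltage_str:
--         targets = [int(x.strip()) for x in joltage_str.split(',')]
--     else:
--         targets = []
--
--     button_configs = []
--     start_paren = line.find('(')
--     while start_paren != -1:
--         end_paren = line.find(')', start_paren)
--         if end_paren == -1:
--             break
--
--         button_str = line[start_paren + 1:end_paren]
--         if button_str: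
--             if ',' in button_str:
--                 indices = [int(x.strip()) for x in button_str.split(',')]
--             else:
--                 indices = [int(button_str)]
--             button_configs.append(indices)
--
--         start_paren = line.find('(', end_paren)
--
--     return targets, button_configs
-- ===== SOURCE B (Python) =====
-- def parse_machine_line(line):
--     start_brace = line.find('{')
--     end_brace = line.find('}')
--     joltage_str = line[start_brace + 1:end_brace]
--
--     if joltage_str:
--         targets = [int(x.strip()) for x in joltage_str.split(',')]
--     else:
--         targets = []
--
--     # single left-to-right pass with an explicit inside/outside-parentheses
--     # state, instead of repeated find()/slice index arithmetic
--     button_configs = []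
--     current = None  # None = outside parentheses, else chars collected so far inside
--     for ch in line:
--         if current is None:
--             if ch == '(':
--                 current = []
--         elif ch == ')':
--             button_str = ''.join(current)
--             if button_str:
--                 if ',' in button_str:
--                     indices = [int(x.strip()) for x in button_str.split(',')]
--                 else:
--                     indices = [int(button_str)]
--                 button_configs.append(indices)
--             current = None
--         else:
--             current.append(ch)
--
--     return targets, button_configs
-- ===== Notes on version B (the rewrite author's own statement) =====
-- stated objective: alternative
-- what changed: The while-loop that repeatedly searches for the next parenthesis pair with line.find and slices by index is replaced by a single left-to-right pass over the characters with an explicit inside/outside-parentheses accumulator state; the brace/targets half is kept verbatim.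
import Mathlib
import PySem

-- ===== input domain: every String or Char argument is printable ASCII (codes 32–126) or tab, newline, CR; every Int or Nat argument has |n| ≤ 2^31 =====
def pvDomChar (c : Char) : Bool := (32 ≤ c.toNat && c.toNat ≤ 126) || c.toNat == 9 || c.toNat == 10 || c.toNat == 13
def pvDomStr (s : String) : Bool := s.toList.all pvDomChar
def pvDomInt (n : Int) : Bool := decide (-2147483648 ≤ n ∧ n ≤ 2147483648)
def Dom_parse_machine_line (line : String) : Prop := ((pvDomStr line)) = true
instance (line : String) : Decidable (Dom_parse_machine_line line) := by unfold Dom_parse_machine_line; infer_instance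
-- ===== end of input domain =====

-- B replaces A's find()/slice index-based while-loop over the parenthesis positions by a single
-- left-to-right pass with an inside/outside-parentheses accumulator state (objective: alternative);
-- the brace/targets half is unchanged.

-- ===== PORT A =====
-- int(x.strip()); ofChars? = none is Python's ValueError, excluded by Pre_ (.getD 0 unreached there)
def pmlIntA (t : List Char) : Int := (PySem.Int.ofChars? (PySem.Chars.strip t)).getD 0

-- A's 'if "," in button_str: … else: indices = [int(button_str)]' block
def pmlIndicesA (b : List Char) : List Int :=
  if PySem.Chars.isIn [','] b then (PySem.Chars.splitOn b [',']).map pmlIntA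
  else [(PySem.Int.ofChars? b).getD 0]

-- A's while-loop; state = start_paren; fuel cs.length+1 suffices since start_paren strictly increases
def pmlLoopA (cs : List Char) : Nat → Int → List (List Int) → List (List Int)
  | 0, _, acc => acc
  | fuel + 1, start_paren, acc =>
    if start_paren = -1 then acc
    else
      let end_paren := PySem.Chars.findFrom cs [')'] start_paren
      if end_paren = -1 then acc
      else
        let button_str := PySem.Chars.slice cs (some (start_paren + 1)) (some end_paren)
        let acc' := if button_str ≠ [] then acc ++ [pmlIndicesA button_str] else acc
        pmlLoopA cs fuel (PySem.Chars.findFrom cs ['('] end_paren) acc'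

def parse_machine_line (line : String) : List Int × List (List Int) :=
  let cs := line.toList
  let start_brace := PySem.Chars.find cs ['{']
  let end_brace := PySem.Chars.find cs ['}']
  let joltage_str := PySem.Chars.slice cs (some (start_brace + 1)) (some end_brace)
  let targets := if joltage_str ≠ [] then (PySem.Chars.splitOn joltage_str [',']).map pmlIntA else []
  (targets, pmlLoopA cs (cs.length + 1) (PySem.Chars.find cs ['(']) [])

-- ===== PORT B =====
def pmlIntB (t : List Char) : Int := (PySem.Int.ofChars? (PySem.Chars.strip t)).getD 0

def pmlIndicesB (b : List Char) : List Int :=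
  if PySem.Chars.isIn [','] b then (PySem.Chars.splitOn b [',']).map pmlIntB
  else [(PySem.Int.ofChars? b).getD 0]

-- one step of B's for-loop; state = (button_configs, current); ''.join(current) is current itself
def pmlStepB (st : List (List Int) × Option (List Char)) (ch : Char) :
    List (List Int) × Option (List Char) :=
  match st with
  | (out, none) => if ch = '(' then (out, some []) else (out, none)
  | (out, some cur) =>
    if ch = ')' then (if cur ≠ [] then out ++ [pmlIndicesB cur] else out, none)
    else (out, some (cur ++ [ch]))

def parse_machine_line_alt (line : String) : List Int × List (List Int) :=
  let cs := line.toList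
  let start_brace := PySem.Chars.find cs ['{']
  let end_brace := PySem.Chars.find cs ['}']
  let joltage_str := PySem.Chars.slice cs (some (start_brace + 1)) (some end_brace)
  let targets := if joltage_str ≠ [] then (PySem.Chars.splitOn joltage_str [',']).map pmlIntB else []
  (targets, (cs.foldl pmlStepB ([], none)).1)

-- ===== PRECONDITION & SPEC =====
-- the substrings enclosed between each opening parenthesis and the first closing one after it
-- (A's button_str values);
-- 'acc = some cur' means: inside parentheses, cur collected so far
def pvInnersSM : Option (List Char) → List Char → List (List Char)
  | _, [] => []
  | none, c :: rest => if c = '(' then pvInnersSM (some []) rest else pvInnersSM none rest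
  | some cur, c :: rest =>
    if c = ')' then cur :: pvInnersSM none rest else pvInnersSM (some (cur ++ [c])) rest

def pvInners (cs : List Char) : List (List Char) := pvInnersSM none cs

-- Pre_ excludes exactly the inputs on which the Python A raises ValueError from int(): a
-- non-integer token between the braces, or a non-integer button_str/token inside parentheses.
-- (The ports themselves agree on every input — on the excluded inputs both Pythons raise the
-- same error — so the equivalence proof below does not need the Pre_ hypothesis.)
def Pre_parse_machine_line (line : String) : Prop :=
  (PySem.Chars.slice line.toList (some (PySem.Chars.find line.toList ['{'] + 1))
      (some (PySem.Chars.find line.toList ['}'])) = [] ∨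
    ∀ t ∈ PySem.Chars.splitOn
        (PySem.Chars.slice line.toList (some (PySem.Chars.find line.toList ['{'] + 1))
          (some (PySem.Chars.find line.toList ['}']))) [','],
      (PySem.Int.ofChars? (PySem.Chars.strip t)).isSome = true) ∧
  ∀ b ∈ pvInners line.toList, b ≠ [] →
    (PySem.Chars.isIn [','] b = true →
      ∀ t ∈ PySem.Chars.splitOn b [','], (PySem.Int.ofChars? (PySem.Chars.strip t)).isSome = true) ∧
    (PySem.Chars.isIn [','] b = false → (PySem.Int.ofChars? b).isSome = true)

instance (line : String) : Decidable (Pre_parse_machine_line line) := by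
  unfold Pre_parse_machine_line; infer_instance

def pvWitness_parse_machine_line : String := "{3, 5} (0,1) () (2)"

def Spec_parse_machine_line (line : String) (out : List Int × List (List Int)) : Prop :=
  out = parse_machine_line_alt line
instance (line : String) (out : List Int × List (List Int)) :
    Decidable (Spec_parse_machine_line line out) := by unfold Spec_parse_machine_line; infer_instance

-- ===== CLAIM (what is proved, stated in full; the proofs are below) =====
def Claim_equal_parse_machine_line : Prop :=
  ∀ (line : String), Dom_parse_machine_line line → Pre_parse_machine_line line →
    Spec_parse_machine_line line (parse_machine_line line)

-- ===== LEMMAS AND PROOFS =====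

lemma pvInnersSM_some (s : List Char) : ∀ cur, pvInnersSM (some cur) s =
    if ')' ∈ s then
      (cur ++ s.takeWhile (· ≠ ')')) ::
        pvInnersSM none (s.drop ((s.takeWhile (· ≠ ')')).length + 1))
    else [] := by
  induction s with
  | nil => intro cur; simp [pvInnersSM]
  | cons c rest ih =>
    intro cur
    by_cases hc : c = ')'
    · subst hc
      rw [show pvInnersSM (some cur) (')' :: rest) = cur :: pvInnersSM none rest from by
            simp [pvInnersSM]]
      rw [if_pos (by simp : (')' : Char) ∈ ')' :: rest),
          show (')' :: rest).takeWhile (· ≠ ')') = [] from by simp]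
      simp
    · rw [show pvInnersSM (some cur) (c :: rest) = pvInnersSM (some (cur ++ [c])) rest from by
            simp [pvInnersSM, hc]]
      rw [ih (cur ++ [c])]
      have htw : (c :: rest).takeWhile (· ≠ ')') = c :: rest.takeWhile (· ≠ ')') := by
        rw [List.takeWhile_cons_of_pos]; simp [hc]
      by_cases hm : ')' ∈ rest
      · rw [if_pos hm, if_pos (by simp [hm] : (')' : Char) ∈ c :: rest), htw]
        simp [List.append_assoc]
      · rw [if_neg hm,
            if_neg (by simp only [List.mem_cons, not_or]
                       exact ⟨fun h => hc h.symm, hm⟩ : ¬ (')' : Char) ∈ c :: rest)]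

lemma pvInners_open (rest : List Char) :
    pvInners ('(' :: rest) =
      if ')' ∈ rest then
        rest.takeWhile (· ≠ ')') :: pvInners (rest.drop ((rest.takeWhile (· ≠ ')')).length + 1))
      else [] := by
  show pvInnersSM (some []) rest = _
  rw [pvInnersSM_some rest []]
  simp [pvInners]

lemma pvInners_cons_ne (c : Char) (rest : List Char) (h : c ≠ '(') :
    pvInners (c :: rest) = pvInners rest := by
  show pvInnersSM none (c :: rest) = pvInnersSM none rest
  rw [pvInnersSM]
  simp [h]

lemma pvInners_nil_of_not_mem (s : List Char) (h : '(' ∉ s) : pvInners s = [] := by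
  induction s with
  | nil => rfl
  | cons c rest ih =>
    simp only [List.mem_cons, not_or] at h
    rw [pvInners_cons_ne c rest (fun hc => h.1 hc.symm)]
    exact ih h.2

lemma pvInners_append_not_mem (t u : List Char) (h : '(' ∉ t) :
    pvInners (t ++ u) = pvInners u := by
  induction t with
  | nil => rfl
  | cons c rest ih =>
    simp only [List.mem_cons, not_or] at h
    rw [List.cons_append, pvInners_cons_ne c _ (fun hc => h.1 hc.symm)]
    exact ih h.2

lemma pml_takeWhile_eq_take (r : List Char) (m : Nat) (hnm : ')' ∉ r.take m)
    (hd : ∃ x, r.drop m = ')' :: x) : r.takeWhile (· ≠ ')') = r.take m := by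
  induction m generalizing r with
  | zero =>
    obtain ⟨x, hx⟩ := hd
    simp at hx; subst hx; simp
  | succ m ih =>
    cases r with
    | nil => obtain ⟨x, hx⟩ := hd; simp at hx
    | cons c rs =>
      simp only [List.take_succ_cons, List.mem_cons, not_or] at hnm
      have hc : c ≠ ')' := fun h => hnm.1 h.symm
      rw [List.take_succ_cons, List.takeWhile_cons_of_pos (by simpa using hc)]
      rw [ih rs hnm.2 (by simpa using hd)]

lemma pml_not_mem_take (l : List Char) (a : Char) (m : Nat)
    (h : ∀ i < m, ¬ [a] <+: l.drop i) : a ∉ l.take m := by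
  intro hmem
  obtain ⟨i, hi, hgi⟩ := List.mem_iff_getElem.1 hmem
  rw [List.length_take] at hi
  have hil : i < l.length := lt_of_lt_of_le hi (min_le_right _ _)
  have him : i < m := lt_of_lt_of_le hi (min_le_left _ _)
  apply h i him
  rw [List.drop_eq_getElem_cons hil]
  refine ⟨l.drop (i + 1), ?_⟩
  simp only [List.singleton_append]
  congr 1
  rw [← hgi, List.getElem_take]

lemma pml_filter_map_cons (f : List Char → List Int) (x : List Char) (l : List (List Char)) :
    ((x :: l).filter (· ≠ [])).map f =
      (if x ≠ [] then [f x] else []) ++ (l.filter (· ≠ [])).map f := by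
  by_cases hx : x = [] <;> simp [hx]

-- A's loop, started at the first '(' at position ≥ k, appends exactly the nonempty inners of cs.drop k
lemma pmlLoopA_eq (cs : List Char) : ∀ (fuel k : Nat) (acc : List (List Int)),
    k ≤ cs.length → cs.length - k < fuel →
    pmlLoopA cs fuel (PySem.Chars.findFrom cs ['('] (k : Int)) acc =
      acc ++ ((pvInners (cs.drop k)).filter (· ≠ [])).map pmlIndicesA := by
  intro fuel
  induction fuel with
  | zero => intro k acc hk hf; omega
  | succ fuel ih =>
    intro k acc hk hf
    rw [PySem.Chars.findFrom_natCast cs ['('] k hk]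
    by_cases h1 : PySem.Chars.find (cs.drop k) ['('] = -1
    · rw [if_pos h1]
      rw [pmlLoopA, if_pos rfl]
      rw [pvInners_nil_of_not_mem (cs.drop k) (by
            rw [← List.singleton_infix_iff]
            exact (PySem.Chars.find_eq_neg_one_iff _ _).1 h1)]
      simp
    · rw [if_neg h1]
      have hp0 : 0 ≤ PySem.Chars.find (cs.drop k) ['('] := by
        have := PySem.Chars.neg_one_le_find (cs.drop k) ['(']
        omega
      set p := (PySem.Chars.find (cs.drop k) ['(']).toNat with hpdef
      have hpcast : PySem.Chars.find (cs.drop k) ['('] = (p : Int) :=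
        (Int.toNat_of_nonneg hp0).symm
      obtain ⟨hpre, hmin⟩ := PySem.Chars.find_spec hp0
      obtain ⟨t, ht⟩ := hpre
      have hsp : (cs.drop k).drop p = '(' :: t := by rw [← ht]; rfl
      have hplen : p < (cs.drop k).length := by
        by_contra h
        rw [List.drop_eq_nil_of_le (by omega)] at hsp
        simp at hsp
      have hslen : (cs.drop k).length = cs.length - k := by simp
      have hstart : (k : Int) + PySem.Chars.find (cs.drop k) ['('] = ((k + p : Nat) : Int) := by
        rw [hpcast]; push_cast; ring
      rw [hstart]
      simp only [pmlLoopA]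
      rw [if_neg (by omega : ¬ ((k + p : Nat) : Int) = -1)]
      have hkp : k + p ≤ cs.length := by omega
      rw [PySem.Chars.findFrom_natCast cs [')'] (k + p) hkp]
      have hdkp : cs.drop (k + p) = '(' :: t := by
        rw [← List.drop_drop, hsp]
      rw [hdkp]
      by_cases e1 : PySem.Chars.find ('(' :: t) [')'] = -1
      · rw [if_pos e1, if_pos rfl]
        have hnp : ')' ∉ '(' :: t := by
          rw [← List.singleton_infix_iff]
          exact (PySem.Chars.find_eq_neg_one_iff _ _).1 e1
        have hpv : pvInners (cs.drop k) = [] := by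
          conv_lhs => rw [← List.take_append_drop p (cs.drop k)]
          rw [pvInners_append_not_mem _ _ (pml_not_mem_take _ '(' p hmin), hsp, pvInners_open,
              if_neg (by simp only [List.mem_cons, not_or] at hnp; exact hnp.2)]
        rw [hpv]; simp
      · rw [if_neg e1]
        have hq0 : 0 ≤ PySem.Chars.find ('(' :: t) [')'] := by
          have := PySem.Chars.neg_one_le_find ('(' :: t) [')']
          omega
        set q := (PySem.Chars.find ('(' :: t) [')']).toNat with hqdef
        have hqcast : PySem.Chars.find ('(' :: t) [')'] = (q : Int) :=
          (Int.toNat_of_nonneg hq0).symm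
        obtain ⟨hqpre, hqmin⟩ := PySem.Chars.find_spec hq0
        obtain ⟨u, hu⟩ := hqpre
        have hu0 : ('(' :: t).drop q = ')' :: u := by rw [← hu]; rfl
        have hq1 : 1 ≤ q := by
          rcases Nat.eq_zero_or_pos q with h0 | h
          · rw [h0, List.drop_zero] at hu0
            exact absurd (List.head_eq_of_cons_eq hu0.symm) (by decide)
          · exact h
        have hqlen : q ≤ t.length := by
          by_contra h
          rw [List.drop_eq_nil_of_le (by simp; omega)] at hu0
          simp at hu0
        have hu' : t.drop (q - 1) = ')' :: u := by
          have h2 := hu0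
          rw [show q = (q - 1) + 1 from by omega, List.drop_succ_cons] at h2
          exact h2
        have hend : ((k + p : Nat) : Int) + PySem.Chars.find ('(' :: t) [')'] =
            ((k + p + q : Nat) : Int) := by rw [hqcast]; push_cast; ring
        rw [hend]
        rw [if_neg (by omega : ¬ ((k + p + q : Nat) : Int) = -1)]
        have hdt : cs.drop (k + p + 1) = t := by
          rw [← List.drop_drop, hdkp, List.drop_one, List.tail_cons]
        have hslice : PySem.Chars.slice cs (some (((k + p : Nat) : Int) + 1))
            (some ((k + p + q : Nat) : Int)) = t.take (q - 1) := by
          rw [show ((k + p : Nat) : Int) + 1 = ((k + p + 1 : Nat) : Int) from by push_cast; ring]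
          rw [PySem.Chars.slice_eq_listSlice, PySem.List.slice_natCast, hdt,
              show k + p + q - (k + p + 1) = q - 1 from by omega]
        rw [hslice]
        have hnpt : ')' ∉ t.take (q - 1) := by
          have h3 := pml_not_mem_take ('(' :: t) ')' q hqmin
          rw [show q = (q - 1) + 1 from by omega, List.take_succ_cons] at h3
          simp only [List.mem_cons, not_or] at h3
          exact h3.2
        have htw : t.takeWhile (· ≠ ')') = t.take (q - 1) :=
          pml_takeWhile_eq_take t (q - 1) hnpt ⟨u, hu'⟩
        have hpv : pvInners (cs.drop k) = t.take (q - 1) :: pvInners (t.drop q) := by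
          conv_lhs => rw [← List.take_append_drop p (cs.drop k)]
          rw [pvInners_append_not_mem _ _ (pml_not_mem_take _ '(' p hmin), hsp, pvInners_open,
              if_pos (by
                have hmem : ')' ∈ t.drop (q - 1) := by rw [hu']; exact List.mem_cons_self ..
                exact List.mem_of_mem_drop hmem)]
          rw [htw]
          congr 2
          rw [List.length_take, min_eq_left (by omega : q - 1 ≤ t.length),
              show q - 1 + 1 = q from by omega]
        have hdq : cs.drop (k + p + q) = ')' :: u := by
          rw [← List.drop_drop, hdkp, hu0]
        have hkq : k + p + q ≤ cs.length := by
          by_contra h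
          rw [List.drop_eq_nil_of_le (by omega)] at hdq
          simp at hdq
        have ih' := ih (k + p + q)
          (if t.take (q - 1) ≠ [] then acc ++ [pmlIndicesA (t.take (q - 1))] else acc)
          hkq (by omega)
        rw [ih']
        have hdu : pvInners (cs.drop (k + p + q)) = pvInners (t.drop q) := by
          rw [hdq, pvInners_cons_ne _ _ (by decide)]
          congr 1
          rw [show q = (q - 1) + 1 from by omega]
          rw [← List.drop_drop, hu', List.drop_one, List.tail_cons]
        rw [hdu, hpv, pml_filter_map_cons]
        by_cases hb : t.take (q - 1) = [] <;> simp [hb, List.append_assoc]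

-- B's fold equals the same pvInners-based form
lemma pmlFoldB_eq (n : Nat) : ∀ (cs : List Char), cs.length ≤ n →
    (∀ out, (List.foldl pmlStepB (out, none) cs).1 =
        out ++ ((pvInners cs).filter (· ≠ [])).map pmlIndicesB) ∧
    (∀ out cur, (List.foldl pmlStepB (out, some cur) cs).1 =
        if ')' ∈ cs then
          out ++ (if cur ++ cs.takeWhile (· ≠ ')') ≠ [] then
                    [pmlIndicesB (cur ++ cs.takeWhile (· ≠ ')'))] else []) ++
            ((pvInners (cs.drop ((cs.takeWhile (· ≠ ')')).length + 1))).filter (· ≠ [])).map pmlIndicesB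
        else out) := by
  induction n with
  | zero =>
    intro cs hlen
    have hnil : cs = [] := List.eq_nil_of_length_eq_zero (Nat.le_zero.1 hlen)
    subst hnil
    exact ⟨fun out => by simp [pvInners, pvInnersSM], fun out cur => by simp⟩
  | succ n ih =>
    intro cs hlen
    cases cs with
    | nil => exact ⟨fun out => by simp [pvInners, pvInnersSM], fun out cur => by simp⟩
    | cons c rest =>
      have hr : rest.length ≤ n := by simpa using hlen
      constructor
      · intro out
        by_cases hc : c = '('
        · subst hc
          rw [List.foldl_cons, show pmlStepB (out, none) '(' = (out, some []) from by
                simp [pmlStepB]]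
          rw [(ih rest hr).2 out []]
          rw [pvInners_open]
          by_cases hm : ')' ∈ rest
          · rw [if_pos hm, if_pos hm, pml_filter_map_cons]
            simp [List.append_assoc]
          · rw [if_neg hm, if_neg hm]
            simp
        · rw [List.foldl_cons, show pmlStepB (out, none) c = (out, none) from by
                simp [pmlStepB, hc]]
          rw [(ih rest hr).1 out, pvInners_cons_ne c rest hc]
      · intro out cur
        by_cases hc : c = ')'
        · subst hc
          rw [List.foldl_cons, show pmlStepB (out, some cur) ')' =
                (if cur ≠ [] then out ++ [pmlIndicesB cur] else out, none) from by simp [pmlStepB]]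
          rw [(ih rest hr).1 _]
          rw [if_pos (by simp : (')' : Char) ∈ ')' :: rest)]
          rw [show (')' :: rest).takeWhile (· ≠ ')') = [] from by simp]
          simp only [List.append_nil, List.length_nil, Nat.zero_add, List.drop_succ_cons,
            List.drop_zero]
          by_cases hcur : cur = [] <;> simp [hcur, List.append_assoc]
        · rw [List.foldl_cons, show pmlStepB (out, some cur) c = (out, some (cur ++ [c])) from by
                simp [pmlStepB, hc]]
          rw [(ih rest hr).2 out (cur ++ [c])]
          have htw : (c :: rest).takeWhile (· ≠ ')') = c :: rest.takeWhile (· ≠ ')') := by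
            rw [List.takeWhile_cons_of_pos]; simp [hc]
          by_cases hm : ')' ∈ rest
          · rw [if_pos hm, if_pos (by simp [hm] : (')' : Char) ∈ c :: rest), htw]
            rw [show cur ++ c :: rest.takeWhile (· ≠ ')') =
                  (cur ++ [c]) ++ rest.takeWhile (· ≠ ')') from by simp]
            rw [if_pos (by simp)]
            simp only [List.length_cons, List.drop_succ_cons]
          · rw [if_neg hm,
                if_neg (by simp only [List.mem_cons, not_or]
                           exact ⟨fun h => hc h.symm, hm⟩ : ¬ (')' : Char) ∈ c :: rest)]

-- ===== VERDICT (by name: the statement is the Claim_ definition above) =====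
theorem parse_machine_line_spec : Claim_equal_parse_machine_line := by
  intro line _ _
  unfold Spec_parse_machine_line
  have h2 : pmlLoopA line.toList (line.toList.length + 1)
      (PySem.Chars.find line.toList ['(']) [] = (line.toList.foldl pmlStepB ([], none)).1 := by
    rw [← PySem.Chars.findFrom_zero line.toList ['('],
        show (0 : Int) = ((0 : Nat) : Int) from rfl,
        pmlLoopA_eq line.toList (line.toList.length + 1) 0 [] (Nat.zero_le _) (by omega),
        (pmlFoldB_eq line.toList.length line.toList le_rfl).1 []]
    simp only [List.drop_zero, List.nil_append]
    rfl
  simp only [parse_machine_line, parse_machine_line_alt]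
  rw [show pmlIntA = pmlIntB from rfl]
  exact congrArg₂ Prod.mk rfl h2
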